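-- pv_equiv track=rewrite | github.com/Ryzhtus/master-thesis | named_entity_recognition/reader_v2.py | __get_documents_entities
-- ===== SOURCE A (Python) =====
-- import collections
--
-- def __get_documents_entities(document: list, document_tags: list):
--     counter = collections.Counter()
--
--     for sentence, tags in zip(document, document_tags):
--         sentence_entity = []
--         sentences_entities = []
--         entity = []
--         entity_tags = []
--         entity_ids = []
--         for idx in range(len(sentence)):
--             if tags[idx] != 'O':
--                 entity.append(sentence[idx])
--                 entity_tags.append(tags[idx])
--                 entity_ids.append(idx)
--
--         if entity:
--             sentence_entity.append(entity[0])
--             for idx in range(1, len(entity)):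
--                 if entity_tags[idx][0] == 'B':
--                     sentences_entities.append(sentence_entity)
--                     sentence_entity = [entity[idx]]
--                 else:
--                     sentence_entity.append(entity[idx])
--             sentences_entities.append(sentence_entity)
--
--             sentences_entities = [' '.join(entity) for entity in sentences_entities]
--             for entity in sentences_entities:
--                 counter[entity] += 1
--
--     return counter
-- ===== SOURCE B (Python) =====
-- import collections
--
-- def __get_documents_entities(document: list, document_tags: list):
--     counter = collections.Counter()
--     for sentence, tags in zip(document, document_tags):
--         current = []
--         for token, tag in zip(sentence, tags):
--             if tag == 'O':
--                 continue
--             if current and tag[0] == 'B':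
--                 counter[' '.join(current)] += 1
--                 current = [token]
--             else:
--                 current.append(token)
--         if current:
--             counter[' '.join(current)] += 1
--     return counter
-- ===== Notes on version B (the rewrite author's own statement) =====
-- stated objective: simpler
-- what changed: A's four per-sentence passes (index loop filtering non-'O' tokens into parallel lists, a second index loop grouping them at 'B' tags, a join comprehension, and a counting loop) are fused into one pass over zip(sentence, tags) that maintains a single current-entity list and counts each entity as soon as it is closed.
import Mathlib
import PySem

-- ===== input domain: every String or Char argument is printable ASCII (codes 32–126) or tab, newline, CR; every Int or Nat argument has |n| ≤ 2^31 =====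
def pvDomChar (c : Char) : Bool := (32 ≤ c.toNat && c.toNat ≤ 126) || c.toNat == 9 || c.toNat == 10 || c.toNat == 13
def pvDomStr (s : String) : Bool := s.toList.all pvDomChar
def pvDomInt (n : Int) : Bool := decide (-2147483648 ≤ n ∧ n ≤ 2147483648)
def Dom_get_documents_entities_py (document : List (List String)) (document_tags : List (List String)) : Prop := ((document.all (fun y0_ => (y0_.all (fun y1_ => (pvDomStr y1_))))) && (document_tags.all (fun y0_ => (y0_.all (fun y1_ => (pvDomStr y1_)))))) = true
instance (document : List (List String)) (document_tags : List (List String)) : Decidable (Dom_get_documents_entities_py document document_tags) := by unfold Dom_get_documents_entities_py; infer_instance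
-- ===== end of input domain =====

-- B fuses A's four per-sentence passes (filter non-'O', group by 'B' tags, join, count) into one
-- pass that maintains a single current-entity list (objective: simpler). Return value only (a Counter,
-- rendered as its item list); neither version mutates its arguments.

-- ===== PORT A =====
-- per-sentence body of A's loop (A's local 'entity_ids' list is appended to but never read; omitted)
def pvASent (counter : PySem.Dict String Int) (sentence : List String) (tags : List String) : PySem.Dict String Int :=
  let et := (PySem.List.pyRange 0 (PySem.List.len sentence)).foldl
    (fun (acc : List String × List String) idx =>
      if PySem.List.pyGetD tags idx "" ≠ "O" then
        (acc.1 ++ [PySem.List.pyGetD sentence idx ""], acc.2 ++ [PySem.List.pyGetD tags idx ""])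
      else acc) ([], [])
  let entity := et.1
  let entity_tags := et.2
  if entity ≠ [] then
    let r := (PySem.List.pyRange 1 (PySem.List.len entity)).foldl
      (fun (acc : List (List String) × List String) idx =>
        if PySem.Str.pyGet? (PySem.List.pyGetD entity_tags idx "") 0 = some 'B' then
          (acc.1 ++ [acc.2], [PySem.List.pyGetD entity idx ""])
        else (acc.1, acc.2 ++ [PySem.List.pyGetD entity idx ""]))
      ([], [PySem.List.pyGetD entity 0 ""])
    let sentences_entities := (r.1 ++ [r.2]).map (fun e => PySem.Str.join " " e)
    sentences_entities.foldl (fun c ent => c.modify ent 0 (· + 1)) counter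
  else counter

def get_documents_entities_py (document : List (List String)) (document_tags : List (List String)) : List (String × Int) :=
  ((document.zip document_tags).foldl (fun c p => pvASent c p.1 p.2) PySem.Dict.empty).items

-- ===== PORT B =====
def pvBSent (counter : PySem.Dict String Int) (sentence : List String) (tags : List String) : PySem.Dict String Int :=
  let r := (sentence.zip tags).foldl
    (fun (acc : PySem.Dict String Int × List String) p =>
      if p.2 = "O" then acc
      else if acc.2 ≠ [] ∧ PySem.Str.pyGet? p.2 0 = some 'B' then
        (acc.1.modify (PySem.Str.join " " acc.2) 0 (· + 1), [p.1])
      else (acc.1, acc.2 ++ [p.1])) (counter, [])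
  if r.2 ≠ [] then r.1.modify (PySem.Str.join " " r.2) 0 (· + 1) else r.1

def get_documents_entities_py_alt (document : List (List String)) (document_tags : List (List String)) : List (String × Int) :=
  ((document.zip document_tags).foldl (fun c p => pvBSent c p.1 p.2) PySem.Dict.empty).items

-- ===== PRECONDITION & SPEC =====
-- Pre_ excludes exactly the inputs where Python A raises IndexError: a zipped sentence longer than
-- its tag list (tags[idx] out of range), or an empty tag string among the non-first non-'O' tags of
-- a zipped pair (entity_tags[idx][0] on "").
def Pre_get_documents_entities_py (document : List (List String)) (document_tags : List (List String)) : Prop :=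
  ∀ p ∈ document.zip document_tags,
    p.1.length ≤ p.2.length ∧
    ∀ q ∈ ((p.1.zip p.2).filter (fun q => q.2 ≠ "O")).tail, q.2 ≠ ""
instance (document : List (List String)) (document_tags : List (List String)) : Decidable (Pre_get_documents_entities_py document document_tags) := by unfold Pre_get_documents_entities_py; infer_instance

def pvWitness_get_documents_entities_py : List (List String) × List (List String) :=
  ([["New", "York", "is", "nice"]], [["B-LOC", "I-LOC", "O", "O"]])

def Spec_get_documents_entities_py (document : List (List String)) (document_tags : List (List String)) (out : List (String × Int)) : Prop := out = get_documents_entities_py_alt document document_tags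
instance (document : List (List String)) (document_tags : List (List String)) (out : List (String × Int)) : Decidable (Spec_get_documents_entities_py document document_tags out) := by unfold Spec_get_documents_entities_py; infer_instance

-- ===== CLAIM (what is proved, stated in full; the proofs are below) =====
def Claim_equal_get_documents_entities_py : Prop := ∀ (document : List (List String)) (document_tags : List (List String)), Dom_get_documents_entities_py document document_tags → Pre_get_documents_entities_py document document_tags → Spec_get_documents_entities_py document document_tags (get_documents_entities_py document document_tags)


-- ===== LEMMAS AND PROOFS =====

-- the conditional double-append of A's first (filter) loop, on a zipped element
def pvF1 (acc : List String × List String) (q : String × String) : List String × List String :=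
  (if q.2 ≠ "O" then acc.1 ++ [q.1] else acc.1, if q.2 ≠ "O" then acc.2 ++ [q.2] else acc.2)

-- A's grouping step, on a zipped element
def pvA (acc : List (List String) × List String) (q : String × String) : List (List String) × List String :=
  if PySem.Str.pyGet? q.2 0 = some 'B' then (acc.1 ++ [acc.2], [q.1]) else (acc.1, acc.2 ++ [q.1])

-- B's fused step, on a non-'O' zipped element
def pvG (acc : PySem.Dict String Int × List String) (q : String × String) : PySem.Dict String Int × List String :=
  if acc.2 ≠ [] ∧ PySem.Str.pyGet? q.2 0 = some 'B' then
    (acc.1.modify (PySem.Str.join " " acc.2) 0 (· + 1), [q.1])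
  else (acc.1, acc.2 ++ [q.1])

def pvBump (c : PySem.Dict String Int) (e : List String) : PySem.Dict String Int :=
  c.modify (PySem.Str.join " " e) 0 (· + 1)

theorem pvA_prefix (rest : List (String × String)) : ∀ (pre : List (List String)) (cur : List String),
    rest.foldl pvA (pre, cur) = (pre ++ (rest.foldl pvA ([], cur)).1, (rest.foldl pvA ([], cur)).2) := by
  induction rest with
  | nil => intro pre cur; simp
  | cons q rest ih =>
    intro pre cur
    simp only [List.foldl_cons]
    by_cases hB : PySem.Str.pyGet? q.2 0 = some 'B'
    · rw [show pvA (pre, cur) q = (pre ++ [cur], [q.1]) from by simp only [pvA]; rw [if_pos hB],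
          show pvA (([] : List (List String)), cur) q = ([cur], [q.1]) from by simp only [pvA]; rw [if_pos hB]; simp]
      rw [ih (pre ++ [cur]) [q.1], ih [cur] [q.1]]
      simp
    · rw [show pvA (pre, cur) q = (pre, cur ++ [q.1]) from by simp only [pvA]; rw [if_neg hB],
          show pvA (([] : List (List String)), cur) q = ([], cur ++ [q.1]) from by simp only [pvA]; rw [if_neg hB]]
      exact ih pre (cur ++ [q.1])

theorem pvG_snd_ne (rest : List (String × String)) : ∀ (c : PySem.Dict String Int) (cur : List String),
    cur ≠ [] → (rest.foldl pvG (c, cur)).2 ≠ [] := by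
  induction rest with
  | nil => intro c cur h; simpa using h
  | cons q rest ih =>
    intro c cur h
    simp only [List.foldl_cons]
    by_cases hB : PySem.Str.pyGet? q.2 0 = some 'B'
    · rw [show pvG (c, cur) q = (pvBump c cur, [q.1]) from by simp only [pvG, pvBump]; rw [if_pos ⟨h, hB⟩]]
      exact ih _ _ (by simp)
    · rw [show pvG (c, cur) q = (c, cur ++ [q.1]) from by simp only [pvG]; rw [if_neg (fun hc => hB hc.2)]]
      exact ih _ _ (by simp)

theorem pvMain (rest : List (String × String)) : ∀ (c : PySem.Dict String Int) (cur : List String), cur ≠ [] →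
    pvBump (rest.foldl pvG (c, cur)).1 (rest.foldl pvG (c, cur)).2
      = ((rest.foldl pvA ([], cur)).1 ++ [(rest.foldl pvA ([], cur)).2]).foldl pvBump c := by
  induction rest with
  | nil => intro c cur h; simp
  | cons q rest ih =>
    intro c cur h
    simp only [List.foldl_cons]
    by_cases hB : PySem.Str.pyGet? q.2 0 = some 'B'
    · rw [show pvG (c, cur) q = (pvBump c cur, [q.1]) from by simp only [pvG, pvBump]; rw [if_pos ⟨h, hB⟩],
          show pvA (([] : List (List String)), cur) q = ([cur], [q.1]) from by simp only [pvA]; rw [if_pos hB]; simp]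
      rw [ih (pvBump c cur) [q.1] (by simp), pvA_prefix rest [cur] [q.1]]
      simp
    · rw [show pvG (c, cur) q = (c, cur ++ [q.1]) from by simp only [pvG]; rw [if_neg (fun hc => hB hc.2)],
          show pvA (([] : List (List String)), cur) q = ([], cur ++ [q.1]) from by simp only [pvA]; rw [if_neg hB]]
      exact ih c (cur ++ [q.1]) (by simp)

theorem pvA2 (l0 : String × String) (rest : List (String × String)) :
    (PySem.List.pyRange 1 ((((l0 :: rest).map Prod.fst).length : Int))).foldl
      (fun (acc : List (List String) × List String) idx =>
        if PySem.Str.pyGet? (PySem.List.pyGetD ((l0 :: rest).map Prod.snd) idx "") 0 = some 'B' then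
          (acc.1 ++ [acc.2], [PySem.List.pyGetD ((l0 :: rest).map Prod.fst) idx ""])
        else (acc.1, acc.2 ++ [PySem.List.pyGetD ((l0 :: rest).map Prod.fst) idx ""]))
      ([], [PySem.List.pyGetD ((l0 :: rest).map Prod.fst) 0 ""])
    = rest.foldl pvA ([], [l0.1]) := by
  have hmap : ((((l0 :: rest).map Prod.fst).length : Int)) = (((l0 :: rest).length : Int)) := by simp
  rw [hmap]
  calc _ = (PySem.List.pyRange 1 (((l0 :: rest).length : Int))).foldl
        (fun acc j => pvA acc (PySem.List.pyGetD (l0 :: rest) j ("", "")))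
        ([], [PySem.List.pyGetD ((l0 :: rest).map Prod.fst) 0 ""]) := by
        refine PySem.List.foldl_congr_mem _ _ _ _ ?_
        intro acc j hj
        obtain ⟨h0', h1⟩ := PySem.List.mem_pyRange_one.mp hj
        have h0 : (0 : Int) ≤ j := by omega
        have h1f : j < ((((l0 :: rest).map Prod.fst).length : Int)) := by
          rw [List.length_map]; omega
        have h1s : j < ((((l0 :: rest).map Prod.snd).length : Int)) := by
          rw [List.length_map]; omega
        rw [PySem.List.pyGetD_eq_getElem ((l0 :: rest).map Prod.snd) "" h0 h1s,
            PySem.List.pyGetD_eq_getElem ((l0 :: rest).map Prod.fst) "" h0 h1f,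
            PySem.List.pyGetD_eq_getElem (l0 :: rest) ("", "") h0 h1]
        simp only [List.getElem_map, pvA]
    _ = ((l0 :: rest).drop 1).foldl pvA ([], [PySem.List.pyGetD ((l0 :: rest).map Prod.fst) 0 ""]) :=
        PySem.List.foldl_pyRange_pyGetD' (l0 :: rest) ("", "") pvA _ (by norm_num)
    _ = _ := by simp [PySem.List.pyGetD_zero_cons]

theorem pvSent_eq (c : PySem.Dict String Int) (s t : List String) (hlen : s.length ≤ t.length) :
    pvASent c s t = pvBSent c s t := by
  have hZ : (s.zip t).length = s.length := by rw [List.length_zip]; omega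
  have hsz : ((s.length : Int)) = (((s.zip t).length : Int)) := by exact_mod_cast hZ.symm
  have hA1 : (PySem.List.pyRange 0 (((s.zip t).length : Int))).foldl
      (fun (acc : List String × List String) idx =>
        if PySem.List.pyGetD t idx "" ≠ "O" then
          (acc.1 ++ [PySem.List.pyGetD s idx ""], acc.2 ++ [PySem.List.pyGetD t idx ""])
        else acc) ([], [])
      = (((s.zip t).filter (fun q => decide (q.2 ≠ "O"))).map Prod.fst,
         ((s.zip t).filter (fun q => decide (q.2 ≠ "O"))).map Prod.snd) := by
    calc _ = (PySem.List.pyRange 0 (((s.zip t).length : Int))).foldl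
            (fun acc j => pvF1 acc (PySem.List.pyGetD (s.zip t) j ("", ""))) ([], []) := by
          refine PySem.List.foldl_congr_mem _ _ _ _ ?_
          intro acc j hj
          obtain ⟨h0, h1⟩ := PySem.List.mem_pyRange_one.mp hj
          have h1s : j < ((s.length : Int)) := by omega
          have h1t : j < ((t.length : Int)) := by omega
          rw [PySem.List.pyGetD_eq_getElem (s.zip t) ("", "") h0 h1,
              PySem.List.pyGetD_eq_getElem s "" h0 h1s,
              PySem.List.pyGetD_eq_getElem t "" h0 h1t]
          by_cases hO : t[j.toNat] = "O"
          · simp [pvF1, List.getElem_zip, hO]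
          · simp [pvF1, List.getElem_zip, hO]
      _ = (s.zip t).foldl pvF1 ([], []) :=
          PySem.List.foldl_pyRange_zero_pyGetD' (s.zip t) ("", "") pvF1 ([], [])
      _ = ((s.zip t).foldl (fun a (q : String × String) => if q.2 ≠ "O" then a ++ [q.1] else a) [],
           (s.zip t).foldl (fun a (q : String × String) => if q.2 ≠ "O" then a ++ [q.2] else a) []) :=
          PySem.List.foldl_prod_mk
            (fun a (q : String × String) => if q.2 ≠ "O" then a ++ [q.1] else a)
            (fun a (q : String × String) => if q.2 ≠ "O" then a ++ [q.2] else a) (s.zip t) [] []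
      _ = _ := by
          rw [PySem.List.foldl_append_ite (fun q : String × String => q.2 ≠ "O") Prod.fst,
              PySem.List.foldl_append_ite (fun q : String × String => q.2 ≠ "O") Prod.snd]
          simp
  have hB1 : (s.zip t).foldl
      (fun (acc : PySem.Dict String Int × List String) p =>
        if p.2 = "O" then acc
        else if acc.2 ≠ [] ∧ PySem.Str.pyGet? p.2 0 = some 'B' then
          (acc.1.modify (PySem.Str.join " " acc.2) 0 (· + 1), [p.1])
        else (acc.1, acc.2 ++ [p.1])) (c, [])
      = ((s.zip t).filter (fun q => decide (q.2 ≠ "O"))).foldl pvG (c, []) := by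
    calc _ = (s.zip t).foldl (fun acc p => if p.2 ≠ "O" then pvG acc p else acc) (c, []) := by
          refine PySem.List.foldl_congr_mem _ _ _ _ ?_
          intro acc p _
          by_cases hO : p.2 = "O"
          · rw [if_pos hO, if_neg (not_not_intro hO)]
          · simp only [pvG]; rw [if_neg hO, if_pos hO]
      _ = _ := PySem.List.foldl_ite_eq_foldl_filter (fun q : String × String => q.2 ≠ "O") pvG (s.zip t) (c, [])
  unfold pvASent pvBSent
  simp only [PySem.List.len_eq]
  rw [hsz, hA1, hB1]
  cases (s.zip t).filter (fun q => decide (q.2 ≠ "O")) with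
  | nil =>
      simp
  | cons l0 rest =>
      dsimp only
      have hent : (l0 :: rest).map Prod.fst ≠ [] := by simp
      rw [if_pos hent, pvA2 l0 rest]
      simp only [List.foldl_cons]
      rw [show pvG (c, ([] : List String)) l0 = (c, [l0.1]) from by
        simp only [pvG]; rw [if_neg (fun hc => hc.1 rfl)]; simp]
      rw [if_pos (pvG_snd_ne rest c [l0.1] (by simp))]
      rw [List.foldl_map]
      have h := pvMain rest c [l0.1] (by simp)
      simp only [pvBump] at h
      exact h.symm

theorem get_documents_entities_py_spec : Claim_equal_get_documents_entities_py := by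
  intro document document_tags _ hpre
  unfold Spec_get_documents_entities_py get_documents_entities_py get_documents_entities_py_alt
  congr 1
  refine PySem.List.foldl_congr_mem _ _ _ _ ?_
  intro c p hp
  exact pvSent_eq c p.1 p.2 (hpre p hp).1
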